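-- pv_equiv track=rewrite | github.com/arielbernal/gb | benchmarks/generators/cooperative_clearing.py | fleet_cells_free
-- ===== SOURCE A (Python) =====
-- def fleet_cells_free(grid, map_size, cs):
--     """Return (free_set, fw, fh) for fleet with given cell_size."""
--     fw = map_size // cs
--     fh = map_size // cs
--     free = set()
--     for fy in range(fh):
--         for fx in range(fw):
--             ok = True
--             for dy in range(cs):
--                 for dx in range(cs):
--                     if grid[fy * cs + dy][fx * cs + dx] != '.':
--                         ok = False
--                         break
--                 if not ok:
--                     break
--             if ok:
--                 free.add((fx, fy))
--     return free, fw, fh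
-- ===== SOURCE B (Python) =====
-- def fleet_cells_free(grid, map_size, cs):
--     """Return (free_set, fw, fh): 2-D prefix sums of free cells, blocks tested by inclusion-exclusion."""
--     fw = map_size // cs
--     fh = fw
--     n = fw * cs
--     P = [[0] * (n + 1)]
--     for y in range(n):
--         prev = P[-1]
--         row = [0]
--         for x in range(n):
--             row.append(prev[x + 1] + row[x] - prev[x] + (grid[y][x] == '.'))
--         P.append(row)
--     free = set()
--     for fy in range(fh):
--         for fx in range(fw):
--             y0, x0 = fy * cs, fx * cs
--             if P[y0 + cs][x0 + cs] - P[y0][x0 + cs] - P[y0 + cs][x0] + P[y0][x0] == cs * cs: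
--                 free.add((fx, fy))
--     return free, fw, fh
-- ===== Notes on version B (the rewrite author's own statement) =====
-- stated objective: alternative
-- what changed: A rescans every cell of each cs-by-cs block with four nested loops and breaks; B builds one 2-D prefix-sum table of free-cell counts over the fw*cs square and decides each block by a constant-time inclusion-exclusion test at its four corners.
-- outside the precondition, e.g. on fleet_cells_free([['.', '#', '#', '.']], 4, 4): A returns (set(), 1, 1), B raises IndexError; on fleet_cells_free([], 4, -2): A returns (set(), -2, -2), B raises IndexError
import Mathlib
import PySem

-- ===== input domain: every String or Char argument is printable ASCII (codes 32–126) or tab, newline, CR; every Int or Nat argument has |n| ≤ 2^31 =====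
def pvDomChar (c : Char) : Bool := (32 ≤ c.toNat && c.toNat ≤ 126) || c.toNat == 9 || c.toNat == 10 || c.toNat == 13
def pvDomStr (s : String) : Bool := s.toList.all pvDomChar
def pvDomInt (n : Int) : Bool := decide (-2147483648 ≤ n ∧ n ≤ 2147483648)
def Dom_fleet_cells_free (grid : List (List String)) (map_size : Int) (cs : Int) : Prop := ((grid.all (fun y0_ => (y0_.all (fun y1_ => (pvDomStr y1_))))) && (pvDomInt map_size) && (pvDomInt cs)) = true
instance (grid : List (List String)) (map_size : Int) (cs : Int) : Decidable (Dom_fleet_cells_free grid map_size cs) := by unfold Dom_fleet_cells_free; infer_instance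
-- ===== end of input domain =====

-- B replaces A's per-block rescanning (four nested loops with break) by a 2-D prefix-sum table of
-- free-cell counts, each block decided by inclusion-exclusion at its four corners (objective: alternative).

-- ===== PORT A =====
-- grid[y][x] as a total function; exact under Pre_ (IndexError inputs are excluded there)
def pvCellA (grid : List (List String)) (y x : Int) : String :=
  PySem.List.pyGetD (PySem.List.pyGetD grid y []) x "#"

-- inner 'for dx in range(cs): if cell != '.': ok = False; break'
def pvRowScanA (grid : List (List String)) (cs fy fx dy : Int) : Bool :=
  (PySem.List.pyRange 0 cs 1).foldl
    (fun ok dx => if ok then (if pvCellA grid (fy * cs + dy) (fx * cs + dx) ≠ "." then false else ok) else ok)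
    true

-- 'for dy in range(cs): …; if not ok: break'
def pvBlockOkA (grid : List (List String)) (cs fy fx : Int) : Bool :=
  (PySem.List.pyRange 0 cs 1).foldl
    (fun ok dy => if ok then pvRowScanA grid cs fy fx dy else ok)
    true

def fleet_cells_free (grid : List (List String)) (map_size : Int) (cs : Int) : (List (Int × Int)) × Int × Int :=
  let fw := PySem.Int.floordiv map_size cs
  let fh := PySem.Int.floordiv map_size cs
  let free := (PySem.List.pyRange 0 fh 1).foldl (fun acc fy =>
      (PySem.List.pyRange 0 fw 1).foldl (fun acc fx =>
        if pvBlockOkA grid cs fy fx then PySem.Set.add acc (fx, fy) else acc) acc)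
    ([] : List (Int × Int))
  (free, fw, fh)

-- ===== PORT B =====
def pvCellB (grid : List (List String)) (y x : Int) : String :=
  PySem.List.pyGetD (PySem.List.pyGetD grid y []) x "#"

-- Python's bool-in-arithmetic '(grid[y][x] == '.')'
def pvInd (grid : List (List String)) (y x : Int) : Int :=
  if pvCellB grid y x == "." then 1 else 0

-- 'row = [0]; for x in range(n): row.append(prev[x+1] + row[x] - prev[x] + (grid[y][x] == '.'))'
def pvRowB (grid : List (List String)) (prev : List Int) (y n : Int) : List Int :=
  (PySem.List.pyRange 0 n 1).foldl
    (fun row x => row ++ [PySem.List.pyGetD prev (x + 1) 0 + PySem.List.pyGetD row x 0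
                          - PySem.List.pyGetD prev x 0 + pvInd grid y x])
    [0]

-- 'P = [[0]*(n+1)]; for y in range(n): prev = P[-1]; …; P.append(row)'
def pvTableB (grid : List (List String)) (n : Int) : List (List Int) :=
  (PySem.List.pyRange 0 n 1).foldl
    (fun P y => P ++ [pvRowB grid (PySem.List.pyGetD P (-1) []) y n])
    [List.replicate (n + 1).toNat 0]

-- 'P[y][x]'
def pvPB (P : List (List Int)) (y x : Int) : Int :=
  PySem.List.pyGetD (PySem.List.pyGetD P y []) x 0

def fleet_cells_free_alt (grid : List (List String)) (map_size : Int) (cs : Int) : (List (Int × Int)) × Int × Int :=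
  let fw := PySem.Int.floordiv map_size cs
  let fh := fw
  let n := fw * cs
  let P := pvTableB grid n
  let free := (PySem.List.pyRange 0 fh 1).foldl (fun acc fy =>
      (PySem.List.pyRange 0 fw 1).foldl (fun acc fx =>
        if pvPB P (fy * cs + cs) (fx * cs + cs) - pvPB P (fy * cs) (fx * cs + cs)
             - pvPB P (fy * cs + cs) (fx * cs) + pvPB P (fy * cs) (fx * cs) = cs * cs
        then PySem.Set.add acc (fx, fy) else acc) acc)
    ([] : List (Int × Int))
  (free, fw, fh)

-- ===== PRECONDITION & SPEC =====
-- Pre_ restricts to the natural domain cs ≥ 1 (cs = 0 raises ZeroDivisionError in A; a negative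
-- cell size is outside the task's natural domain and B's table pass raises IndexError there) and
-- to grids carrying the full fw*cs × fh*cs rectangle of cells: on ragged/short grids A may return
-- via its early break before reaching a missing cell while B's table pass reads every cell and
-- raises IndexError.
def Pre_fleet_cells_free (grid : List (List String)) (map_size : Int) (cs : Int) : Prop :=
  1 ≤ cs ∧
  (0 < PySem.Int.floordiv map_size cs →
    (PySem.Int.floordiv map_size cs * cs).toNat ≤ grid.length ∧
    ∀ row ∈ grid.take (PySem.Int.floordiv map_size cs * cs).toNat,
      (PySem.Int.floordiv map_size cs * cs).toNat ≤ row.length)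
instance (grid : List (List String)) (map_size : Int) (cs : Int) : Decidable (Pre_fleet_cells_free grid map_size cs) := by unfold Pre_fleet_cells_free; infer_instance

def pvWitness_fleet_cells_free : List (List String) × Int × Int :=
  ([[".", "#"], [".", "."]], 2, 1)

def Spec_fleet_cells_free (grid : List (List String)) (map_size : Int) (cs : Int) (out : (List (Int × Int)) × Int × Int) : Prop := out = fleet_cells_free_alt grid map_size cs
instance (grid : List (List String)) (map_size : Int) (cs : Int) (out : (List (Int × Int)) × Int × Int) : Decidable (Spec_fleet_cells_free grid map_size cs out) := by unfold Spec_fleet_cells_free; infer_instance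

-- ===== CLAIM (what is proved, stated in full; the proofs are below) =====
def Claim_equal_fleet_cells_free : Prop := ∀ (grid : List (List String)) (map_size : Int) (cs : Int), Dom_fleet_cells_free grid map_size cs → Pre_fleet_cells_free grid map_size cs → Spec_fleet_cells_free grid map_size cs (fleet_cells_free grid map_size cs)

-- ===== LEMMAS AND PROOFS =====

-- the mathematical 2-D prefix sum the table computes
def pvS (grid : List (List String)) (y x : Nat) : Int :=
  ∑ j ∈ Finset.range y, ∑ i ∈ Finset.range x, pvInd grid (j : Int) (i : Int)

theorem pvS_zero_left (grid : List (List String)) (x : Nat) : pvS grid 0 x = 0 := by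
  simp [pvS]

theorem pvS_zero_right (grid : List (List String)) (y : Nat) : pvS grid y 0 = 0 := by
  simp [pvS]

theorem pvS_succ_right (grid : List (List String)) (y x : Nat) :
    pvS grid y (x + 1) = pvS grid y x + ∑ j ∈ Finset.range y, pvInd grid (j : Int) (x : Int) := by
  simp [pvS, Finset.sum_range_succ, Finset.sum_add_distrib]

theorem pvS_cross (grid : List (List String)) (y m : Nat) :
    pvS grid (y + 1) (m + 1)
      = pvS grid y (m + 1) + pvS grid (y + 1) m - pvS grid y m + pvInd grid (y : Int) (m : Int) := by
  simp only [pvS_succ_right, Finset.sum_range_succ]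
  ring

def pvRowAt (grid : List (List String)) (n y : Nat) : List Int :=
  (List.range (n + 1)).map (fun x => pvS grid y x)

-- one pass of the row loop builds the next prefix-sum row
theorem pv_row_eq (grid : List (List String)) (y n : Nat) (prev : List Int)
    (hprev : ∀ k : Nat, k ≤ n → prev.getD k 0 = pvS grid y k) :
    pvRowB grid prev (y : Int) (n : Int) = pvRowAt grid n (y + 1) := by
  unfold pvRowB pvRowAt
  rw [PySem.List.pyRange_zero_nat, List.foldl_map]
  have key : ∀ m : Nat, m ≤ n →
      (List.range m).foldl
        (fun row (k : Nat) => row ++ [PySem.List.pyGetD prev ((k : Int) + 1) 0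
            + PySem.List.pyGetD row (k : Int) 0 - PySem.List.pyGetD prev (k : Int) 0
            + pvInd grid (y : Int) (k : Int)]) [0]
      = (List.range (m + 1)).map (fun x => pvS grid (y + 1) x) := by
    intro m hm
    induction m with
    | zero => simp [pvS_zero_right]
    | succ m ih =>
      rw [List.range_succ, List.foldl_append, ih (by omega)]
      simp only [List.foldl_cons, List.foldl_nil]
      have h1 : PySem.List.pyGetD prev ((m : Int) + 1) 0 = pvS grid y (m + 1) := by
        rw [show ((m : Int) + 1) = ((m + 1 : Nat) : Int) by push_cast; ring,
            PySem.List.pyGetD_natCast, hprev (m + 1) (by omega)]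
      have h2 : PySem.List.pyGetD prev (m : Int) 0 = pvS grid y m := by
        rw [PySem.List.pyGetD_natCast, hprev m (by omega)]
      have h3 : PySem.List.pyGetD ((List.range (m + 1)).map (fun x => pvS grid (y + 1) x)) (m : Int) 0
          = pvS grid (y + 1) m := by
        rw [PySem.List.pyGetD_natCast, PySem.List.getD_map_range _ _ _ _ (by omega)]
      rw [h1, h2, h3, List.range_succ (n := m + 1), List.map_append]
      simp [pvS_cross]
  exact key n le_rfl

-- the table loop builds all prefix-sum rows
theorem pv_table_eq (grid : List (List String)) (n : Nat) :
    pvTableB grid (n : Int) = (List.range (n + 1)).map (fun y => pvRowAt grid n y) := by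
  unfold pvTableB
  rw [PySem.List.pyRange_zero_nat, List.foldl_map]
  have h0 : List.replicate (((n : Int) + 1)).toNat 0 = pvRowAt grid n 0 := by
    unfold pvRowAt
    rw [show ((n : Int) + 1).toNat = n + 1 by omega]
    rw [show (fun x : Nat => pvS grid 0 x) = Function.const Nat (0 : Int) from
          funext fun x => pvS_zero_left grid x,
        List.map_const, List.length_range]
  rw [h0]
  have key : ∀ m : Nat, m ≤ n →
      (List.range m).foldl
        (fun P (y : Nat) => P ++ [pvRowB grid (PySem.List.pyGetD P (-1) []) (y : Int) (n : Int)])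
        [pvRowAt grid n 0]
      = (List.range (m + 1)).map (fun y => pvRowAt grid n y) := by
    intro m hm
    induction m with
    | zero => simp
    | succ m ih =>
      rw [List.range_succ, List.foldl_append, ih (by omega)]
      simp only [List.foldl_cons, List.foldl_nil]
      have hlast : PySem.List.pyGetD ((List.range (m + 1)).map (fun y => pvRowAt grid n y)) (-1) []
          = pvRowAt grid n m := by
        rw [List.range_succ, List.map_append]
        exact PySem.List.pyGetD_neg_one_append_singleton _ _ _
      rw [hlast, pv_row_eq grid m n _ (fun k hk => by
            unfold pvRowAt
            exact PySem.List.getD_map_range _ _ _ _ (by omega))]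
      rw [show List.range (m + 1 + 1) = List.range (m + 1) ++ [m + 1] from List.range_succ,
          List.map_append]
      rfl
  exact key n le_rfl

-- table lookup at an in-range corner is the prefix sum
theorem pv_lookup (grid : List (List String)) (n : Nat) (y x : Nat)
    (hy : y ≤ n) (hx : x ≤ n) :
    pvPB (pvTableB grid (n : Int)) (y : Int) (x : Int) = pvS grid y x := by
  unfold pvPB
  rw [pv_table_eq]
  simp only [PySem.List.pyGetD_natCast]
  rw [PySem.List.getD_map_range _ _ _ _ (by omega)]
  unfold pvRowAt
  rw [PySem.List.getD_map_range _ _ _ _ (by omega)]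

-- inclusion-exclusion: the four-corner combination is the block sum
theorem pv_corner (grid : List (List String)) (a b c : Nat) :
    pvS grid (a + c) (b + c) - pvS grid a (b + c) - pvS grid (a + c) b + pvS grid a b
      = ∑ p ∈ Finset.Ico a (a + c) ×ˢ Finset.Ico b (b + c), pvInd grid (p.1 : Int) (p.2 : Int) := by
  rw [Finset.sum_product]
  have hinner : ∀ j : Nat, ∑ i ∈ Finset.Ico b (b + c), pvInd grid (j : Int) (i : Int)
      = ∑ i ∈ Finset.range (b + c), pvInd grid (j : Int) (i : Int)
        - ∑ i ∈ Finset.range b, pvInd grid (j : Int) (i : Int) :=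
    fun j => Finset.sum_Ico_eq_sub _ (Nat.le_add_right b c)
  simp only [hinner, Finset.sum_sub_distrib]
  rw [Finset.sum_Ico_eq_sub
        (fun j => ∑ i ∈ Finset.range (b + c), pvInd grid (j : Int) (i : Int)) (Nat.le_add_right a c),
      Finset.sum_Ico_eq_sub
        (fun j => ∑ i ∈ Finset.range b, pvInd grid (j : Int) (i : Int)) (Nat.le_add_right a c)]
  simp only [pvS]
  ring

theorem pvInd_le_one (grid : List (List String)) (y x : Int) : pvInd grid y x ≤ 1 := by
  unfold pvInd; split <;> simp

theorem pvInd_eq_one_iff (grid : List (List String)) (y x : Int) :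
    pvInd grid y x = 1 ↔ pvCellB grid y x = "." := by
  unfold pvInd; split <;> simp_all

-- a sum of terms each ≤ 1 equals the number of terms iff every term is 1
theorem pv_sum_ones_iff {ι : Type} [DecidableEq ι] (s : Finset ι) (f : ι → Int)
    (h1 : ∀ i ∈ s, f i ≤ 1) :
    (∑ i ∈ s, f i = (s.card : Int)) ↔ ∀ i ∈ s, f i = 1 := by
  constructor
  · intro h i hi
    by_contra hne
    have hlt : f i < 1 := lt_of_le_of_ne (h1 i hi) hne
    have hstrict : ∑ j ∈ s, f j < ∑ j ∈ s, (1 : Int) :=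
      Finset.sum_lt_sum h1 ⟨i, hi, hlt⟩
    rw [h] at hstrict
    simp at hstrict
  · intro h
    rw [Finset.sum_congr rfl h]
    simp

-- A's transliterated break-loops as an 'all'
theorem pv_foldl_flag_all (l : List Int) (g : Int → Bool) (b : Bool) :
    l.foldl (fun ok x => if ok then g x else ok) b = (b && l.all g) := by
  induction l generalizing b with
  | nil => simp
  | cons x xs ih =>
    simp only [List.foldl_cons, List.all_cons, ih]
    cases b <;> simp

theorem pv_rowScanA_eq (grid : List (List String)) (cs fy fx dy : Int) :
    pvRowScanA grid cs fy fx dy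
      = (PySem.List.pyRange 0 cs 1).all
          (fun dx => pvCellA grid (fy * cs + dy) (fx * cs + dx) == ".") := by
  unfold pvRowScanA
  have hfun : (fun (ok : Bool) (dx : Int) =>
      if ok then (if pvCellA grid (fy * cs + dy) (fx * cs + dx) ≠ "." then false else ok) else ok)
      = (fun ok dx => if ok then (pvCellA grid (fy * cs + dy) (fx * cs + dx) == ".") else ok) := by
    funext ok dx
    cases ok <;> by_cases h : pvCellA grid (fy * cs + dy) (fx * cs + dx) = "." <;> simp [h]
  rw [hfun, pv_foldl_flag_all]
  simp

theorem pv_blockOkA_iff (grid : List (List String)) (cs fy fx : Int) :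
    pvBlockOkA grid cs fy fx = true
      ↔ ∀ dy : Int, 0 ≤ dy → dy < cs → ∀ dx : Int, 0 ≤ dx → dx < cs →
          pvCellA grid (fy * cs + dy) (fx * cs + dx) = "." := by
  unfold pvBlockOkA
  rw [pv_foldl_flag_all]
  simp only [Bool.true_and]
  rw [List.all_eq_true]
  constructor
  · intro h dy hdy0 hdy dx hdx0 hdx
    have := h dy (PySem.List.mem_pyRange_one.mpr ⟨hdy0, hdy⟩)
    rw [pv_rowScanA_eq, List.all_eq_true] at this
    have := this dx (PySem.List.mem_pyRange_one.mpr ⟨hdx0, hdx⟩)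
    simpa using this
  · intro h dy hdy
    rw [pv_rowScanA_eq, List.all_eq_true]
    intro dx hdx
    rw [PySem.List.mem_pyRange_one] at hdy hdx
    simpa using h dy hdy.1 hdy.2 dx hdx.1 hdx.2

-- the B-side corner test decides exactly A's block scan
theorem pv_cond_iff (grid : List (List String)) (cs fw fy fx : Int)
    (hcs : 1 ≤ cs) (hfy0 : 0 ≤ fy) (hfy : fy < fw) (hfx0 : 0 ≤ fx) (hfx : fx < fw) :
    (pvPB (pvTableB grid (fw * cs)) (fy * cs + cs) (fx * cs + cs)
       - pvPB (pvTableB grid (fw * cs)) (fy * cs) (fx * cs + cs)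
       - pvPB (pvTableB grid (fw * cs)) (fy * cs + cs) (fx * cs)
       + pvPB (pvTableB grid (fw * cs)) (fy * cs) (fx * cs) = cs * cs)
      ↔ pvBlockOkA grid cs fy fx = true := by
  obtain ⟨c, rfl⟩ : ∃ c : Nat, cs = (c : Int) := ⟨cs.toNat, (Int.toNat_of_nonneg (by omega)).symm⟩
  have hc0 : (0 : Int) ≤ (c : Int) := by positivity
  obtain ⟨a, ha⟩ : ∃ a : Nat, fy * (c : Int) = ((a : Nat) : Int) :=
    ⟨(fy * (c : Int)).toNat, (Int.toNat_of_nonneg (mul_nonneg hfy0 hc0)).symm⟩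
  obtain ⟨b, hb⟩ : ∃ b : Nat, fx * (c : Int) = ((b : Nat) : Int) :=
    ⟨(fx * (c : Int)).toNat, (Int.toNat_of_nonneg (mul_nonneg hfx0 hc0)).symm⟩
  obtain ⟨n, hn⟩ : ∃ n : Nat, fw * (c : Int) = ((n : Nat) : Int) :=
    ⟨(fw * (c : Int)).toNat, (Int.toNat_of_nonneg (mul_nonneg (by omega) hc0)).symm⟩
  have hstep_y : (fy + 1) * (c : Int) ≤ fw * (c : Int) :=
    mul_le_mul_of_nonneg_right (by omega) hc0
  have hstep_x : (fx + 1) * (c : Int) ≤ fw * (c : Int) :=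
    mul_le_mul_of_nonneg_right (by omega) hc0
  have hac : a + c ≤ n := by
    have h1 : ((a : Int)) + c ≤ n := by rw [← ha, ← hn]; linarith
    exact_mod_cast h1
  have hbc : b + c ≤ n := by
    have h1 : ((b : Int)) + c ≤ n := by rw [← hb, ← hn]; linarith
    exact_mod_cast h1
  have ey : fy * (c : Int) + c = (((a + c : Nat)) : Int) := by rw [ha]; push_cast; ring
  have ex : fx * (c : Int) + c = (((b + c : Nat)) : Int) := by rw [hb]; push_cast; ring
  rw [hn, ey, ex, ha, hb,
      pv_lookup grid n (a + c) (b + c) hac hbc,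
      pv_lookup grid n a (b + c) (by omega) hbc,
      pv_lookup grid n (a + c) b hac (by omega),
      pv_lookup grid n a b (by omega) (by omega),
      pv_corner]
  have hcard : ((Finset.Ico a (a + c)) ×ˢ (Finset.Ico b (b + c))).card = c * c := by
    simp [Finset.card_product, Nat.card_Ico]
  have hsum := pv_sum_ones_iff ((Finset.Ico a (a + c)) ×ˢ (Finset.Ico b (b + c)))
      (fun p => pvInd grid (p.1 : Int) (p.2 : Int)) (fun p _ => pvInd_le_one _ _ _)
  rw [hcard] at hsum
  rw [show ((c : Int) * (c : Int)) = (((c * c : Nat)) : Int) by push_cast; ring, hsum,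
      pv_blockOkA_iff]
  constructor
  · intro h dy hdy0 hdy dx hdx0 hdx
    have hmem : (a + dy.toNat, b + dx.toNat)
        ∈ (Finset.Ico a (a + c)) ×ˢ (Finset.Ico b (b + c)) := by
      simp only [Finset.mem_product, Finset.mem_Ico]
      omega
    have hv := h (a + dy.toNat, b + dx.toNat) hmem
    rw [pvInd_eq_one_iff] at hv
    have ej : (((a + dy.toNat : Nat)) : Int) = fy * (c : Int) + dy := by
      push_cast [Int.toNat_of_nonneg hdy0]
      omega
    have ei : (((b + dx.toNat : Nat)) : Int) = fx * (c : Int) + dx := by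
      push_cast [Int.toNat_of_nonneg hdx0]
      omega
    rw [ej, ei] at hv
    exact hv
  · intro h p hp
    simp only [Finset.mem_product, Finset.mem_Ico] at hp
    have hj1 : ((a : Nat) : Int) ≤ (p.1 : Int) := by exact_mod_cast hp.1.1
    have hj2 : (p.1 : Int) < (((a + c : Nat)) : Int) := by exact_mod_cast hp.1.2
    have hi1 : ((b : Nat) : Int) ≤ (p.2 : Int) := by exact_mod_cast hp.2.1
    have hi2 : (p.2 : Int) < (((b + c : Nat)) : Int) := by exact_mod_cast hp.2.2
    push_cast at hj2 hi2
    rw [pvInd_eq_one_iff]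
    have hcell := h ((p.1 : Int) - fy * (c : Int)) (by omega) (by omega)
      ((p.2 : Int) - fx * (c : Int)) (by omega) (by omega)
    rw [show fy * (c : Int) + ((p.1 : Int) - fy * (c : Int)) = (p.1 : Int) by ring,
        show fx * (c : Int) + ((p.2 : Int) - fx * (c : Int)) = (p.2 : Int) by ring] at hcell
    exact hcell

-- ===== VERDICT (by name: the statement is the Claim_ definition above) =====
theorem fleet_cells_free_spec : Claim_equal_fleet_cells_free := by
  intro grid map_size cs _ hpre
  obtain ⟨hcs, -⟩ := hpre
  unfold Spec_fleet_cells_free fleet_cells_free fleet_cells_free_alt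
  refine congrArg (fun s => (s, _, _)) ?_
  by_cases hpos : 0 < PySem.Int.floordiv map_size cs
  · refine PySem.List.foldl_congr_mem _ _ _ _ ?_
    intro acc fy hfy
    refine PySem.List.foldl_congr_mem _ _ _ _ ?_
    intro acc' fx hfx
    rw [PySem.List.mem_pyRange_one] at hfy hfx
    have h := pv_cond_iff grid cs (PySem.Int.floordiv map_size cs) fy fx hcs
      hfy.1 hfy.2 hfx.1 hfx.2
    by_cases hb : pvBlockOkA grid cs fy fx = true
    · rw [hb, if_pos rfl, if_pos (h.mpr hb)]
    · rw [Bool.not_eq_true] at hb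
      rw [hb, if_neg (by simp), if_neg (fun hcon => by simp [h.mp hcon] at hb)]
  · rw [PySem.List.pyRange_one_eq_nil (by omega)]
    rfl
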